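-- pv_equiv track=rewrite | github.com/gaeju/- | 프로그래머스/2/42586. 기능개발/기능개발.py | solution
-- ===== SOURCE A (Python) =====
-- def solution(progresses, speed):
--     answer = []
--     li = []
--     while True:
--         progresses = [x + y for x, y in zip(progresses,speed)]
--         if progresses[0] >= 100:
--             li = []
--             for idx, i in enumerate(progresses):
--                 if i < 100:
--                     break
--
--                 li.append(progresses[0])
--                 progresses = progresses[1:]
--                 speed = speed[1:]
--             answer.append(len(li))
--
--         if len(progresses) == 0:
--             break
--     return answer
-- ===== SOURCE B (Python) =====
-- def solution(progresses, speed):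
--     # per-task completion day (>= 1, since A checks after the first increment),
--     # then one pass grouping consecutive tasks by the running-max day
--     days = [max(1, -((p - 100) // s)) for p, s in zip(progresses, speed)]
--     answer = []
--     cur = days[0]
--     count = 0
--     for d in days:
--         if d > cur:
--             answer.append(count)
--             cur = d
--             count = 1
--         else:
--             count += 1
--     answer.append(count)
--     return answer
-- ===== Notes on version B (the rewrite author's own statement) =====
-- stated objective: alternative
-- what changed: A simulates the deployment queue day by day (incrementing every task each day and popping the completed prefix); B computes each task's completion day directly by ceiling division and produces the group sizes in a single pass that groups consecutive tasks under the running-max day.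
-- outside the precondition, e.g. on solution([100], [0]): A returns [1], B raises ZeroDivisionError; on solution([150, 200], [-5, -5]): A returns [2], B returns [1, 1]
import Mathlib
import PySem

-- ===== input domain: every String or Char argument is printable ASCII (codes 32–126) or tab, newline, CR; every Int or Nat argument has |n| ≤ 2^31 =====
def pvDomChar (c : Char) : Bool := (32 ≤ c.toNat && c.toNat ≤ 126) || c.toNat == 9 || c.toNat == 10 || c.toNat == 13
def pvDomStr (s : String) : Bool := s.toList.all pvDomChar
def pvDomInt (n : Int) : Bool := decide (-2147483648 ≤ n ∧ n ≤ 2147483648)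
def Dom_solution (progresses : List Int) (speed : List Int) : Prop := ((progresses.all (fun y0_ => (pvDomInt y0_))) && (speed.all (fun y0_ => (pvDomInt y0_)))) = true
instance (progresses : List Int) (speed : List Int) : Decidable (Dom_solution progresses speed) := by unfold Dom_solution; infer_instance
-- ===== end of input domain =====

-- B replaces A's day-by-day queue simulation by computing each task's completion day by ceiling
-- division and grouping consecutive tasks in one pass; return-value equivalence proved on Pre_solution.


-- ===== PORT A =====
-- the inner 'for idx, i in enumerate(progresses)' loop: iterates the snapshot taken at loop entry
-- while progresses/speed are re-bound to their tails; progresses[0] is headD (the list is nonempty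
-- whenever it is read: it shrinks in lockstep with the snapshot being iterated)
def pvInnerA : List Int → List Int → List Int → List Int → List Int × List Int × List Int
  | [], li, P, S => (li, P, S)
  | i :: rest, li, P, S =>
    if i < 100 then (li, P, S)                                       -- break
    else pvInnerA rest (li ++ [P.headD 0])                           -- li.append(progresses[0])
           (PySem.List.slice P (some 1) none)                        -- progresses = progresses[1:]
           (PySem.List.slice S (some 1) none)                        -- speed = speed[1:]

-- the 'while True' loop; the loop runs once per day, and whenever Python's A terminates a
-- task of progress p and positive speed completes within 100 + |p| days, so the fuel below
-- is never exhausted on inputs where A returns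
def pvOuterA (fuel : Nat) (P S answer : List Int) : List Int :=
  match fuel with
  | 0 => answer
  | f + 1 =>
    let P1 := (P.zip S).map (fun xy => xy.1 + xy.2)                  -- progresses = [x+y for ...]
    match PySem.List.pyGet? P1 0 with                                -- progresses[0]
    | none => answer                                                 -- IndexError (outside Pre_solution)
    | some h =>
      if 100 ≤ h then
        match pvInnerA P1 [] P1 S with
        | (li, P2, S2) =>
          let answer2 := answer ++ [(li.length : Int)]               -- answer.append(len(li))
          if P2.length = 0 then answer2 else pvOuterA f P2 S2 answer2
      else
        if P1.length = 0 then answer else pvOuterA f P1 S answer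

def solution (progresses : List Int) (speed : List Int) : List Int :=
  pvOuterA (101 + (progresses.map Int.natAbs).sum) progresses speed []

-- ===== PORT B =====
-- completion day of one task: max(1, -((p - 100) // s))
def pvDay (p s : Int) : Int := max 1 (-(PySem.Int.floordiv (p - 100) s))

-- the 'for d in days' loop of Source B (answer, cur, count as loop state)
def pvGroupGo : List Int → Int → Int → List Int → List Int
  | [], _, count, answer => answer ++ [count]
  | d :: rest, cur, count, answer =>
    if cur < d then pvGroupGo rest d 1 (answer ++ [count])
    else pvGroupGo rest cur (count + 1) answer

def solution_alt (progresses : List Int) (speed : List Int) : List Int :=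
  let days := (progresses.zip speed).map (fun ps => pvDay ps.1 ps.2)
  match days with
  | [] => []                                                         -- days[0]: IndexError (outside Pre_solution)
  | d0 :: _ => pvGroupGo days d0 0 []

-- ===== PRECONDITION & SPEC =====
-- Pre_solution excludes empty inputs, on which A raises IndexError at progresses[0], and inputs
-- pairing a task with a speed ≤ 0: there A loops forever unless every such task is already ≥ 100
-- after day one, B divides by zero when a speed is 0, and on negative speeds B's ceiling-division
-- completion day is meaningless where A can still return (see the cites).
def Pre_solution (progresses : List Int) (speed : List Int) : Prop :=
  progresses.zip speed ≠ [] ∧ ∀ x ∈ progresses.zip speed, 1 ≤ x.2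
instance (progresses : List Int) (speed : List Int) : Decidable (Pre_solution progresses speed) := by
  unfold Pre_solution; infer_instance

def pvWitness_solution : List Int × List Int := ([93, 30, 55], [1, 30, 5])

def Spec_solution (progresses : List Int) (speed : List Int) (out : List Int) : Prop := out = solution_alt progresses speed
instance (progresses : List Int) (speed : List Int) (out : List Int) : Decidable (Spec_solution progresses speed out) := by unfold Spec_solution; infer_instance

-- ===== CLAIM (what is proved, stated in full; the proofs are below) =====
def Claim_equal_solution : Prop := ∀ (progresses : List Int) (speed : List Int), Dom_solution progresses speed → Pre_solution progresses speed → Spec_solution progresses speed (solution progresses speed)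

-- ===== LEMMAS AND PROOFS =====

-- abbreviations used only by the proofs
def pvFs (x : Int × Int) : Int := x.1 + x.2
def pvDd (x : Int × Int) : Int := pvDay x.1 x.2
def pvShift (d : Int) : Int := max 1 (d - 1)
lemma pvDay_one_le (p s : Int) : 1 ≤ pvDay p s := le_max_left _ _

lemma pvDay_eq_one_iff (p s : Int) (hs : 1 ≤ s) : pvDay p s = 1 ↔ 100 ≤ p + s := by
  have h1 : (-1 : Int) ≤ PySem.Int.floordiv (p - 100) s ↔ (-1) * s ≤ p - 100 :=
    PySem.Int.le_floordiv_iff_mul_le (by omega)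
  unfold pvDay; omega

lemma pvDay_shift (p s : Int) (hs : 1 ≤ s) : pvDay (p + s) s = pvShift (pvDay p s) := by
  have he : PySem.Int.floordiv (p + s - 100) s = PySem.Int.floordiv (p - 100) s + 1 := by
    rw [PySem.Int.floordiv_eq_ediv_of_pos (show (0:Int) < s by omega),
        PySem.Int.floordiv_eq_ediv_of_pos (show (0:Int) < s by omega)]
    have h2 : p + s - 100 = (p - 100) + 1 * s := by ring
    rw [h2, Int.add_mul_ediv_right _ _ (by omega : s ≠ 0)]
  unfold pvDay pvShift; rw [he]; omega

lemma pvDay_le_abs (p s : Int) (hs : 1 ≤ s) : pvDay p s ≤ 100 + (p.natAbs : Int) := by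
  have hfd : p - 100 ≤ PySem.Int.floordiv (p - 100) s ∨
      0 ≤ PySem.Int.floordiv (p - 100) s := by
    rw [PySem.Int.floordiv_eq_ediv_of_pos (show (0:Int) < s by omega)]
    by_cases hp : 100 ≤ p
    · exact Or.inr (Int.ediv_nonneg (by omega) (by omega))
    · left
      rw [Int.le_ediv_iff_mul_le (by omega : (0:Int) < s)]
      have := mul_le_mul_of_nonpos_left (show (1:Int) ≤ s by omega)
        (show p - 100 ≤ 0 by omega)
      omega
  unfold pvDay; omega

lemma pvInnerA_spec (Z : List (Int × Int)) (li S : List Int) (hs : ∀ x ∈ Z, 1 ≤ x.2) :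
    pvInnerA (Z.map pvFs) li (Z.map pvFs) S =
      (li ++ (Z.map pvFs).take ((Z.map pvDd).takeWhile (· == 1)).length,
       (Z.drop ((Z.map pvDd).takeWhile (· == 1)).length).map pvFs,
       S.drop ((Z.map pvDd).takeWhile (· == 1)).length) := by
  induction Z generalizing li S with
  | nil => simp [pvInnerA]
  | cons x Z' ih =>
    obtain ⟨p, s⟩ := x
    have hs1 : 1 ≤ s := hs (p, s) (by simp)
    by_cases hc : p + s < 100
    · have hd : ¬ (pvDd (p, s) == 1) = true := by
        simp [pvDd]
        have := pvDay_eq_one_iff p s hs1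
        omega
      simp only [List.map_cons, pvInnerA, pvFs, List.takeWhile_cons, hd]
      simp [hc, pvFs]
    · have hd : (pvDd (p, s) == 1) = true := by
        simp [pvDd]
        exact (pvDay_eq_one_iff p s hs1).2 (by omega)
      simp only [List.map_cons, pvInnerA, List.takeWhile_cons, hd]
      rw [if_neg (by simpa [pvFs] using hc)]
      simp only [pvFs, List.headD_cons, PySem.List.slice_from_one, List.tail_cons]
      rw [show (li ++ [p + s]) = li ++ [pvFs (p, s)] from by simp [pvFs]]
      rw [ih (li ++ [pvFs (p, s)]) S.tail (fun x hx => hs x (by simp [hx]))]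
      simp [pvFs]

lemma pvGroupGo_acc (ds : List Int) (cur count : Int) (answer : List Int) :
    pvGroupGo ds cur count answer = answer ++ pvGroupGo ds cur count [] := by
  induction ds generalizing cur count answer with
  | nil => simp [pvGroupGo]
  | cons d rest ih =>
    simp only [pvGroupGo]
    by_cases h : cur < d
    · rw [if_pos h, if_pos h, ih _ _ (answer ++ [count]), ih _ _ ([] ++ [count])]
      simp
    · rw [if_neg h, if_neg h, ih _ _ answer]

lemma pvGroupGo_shift (ds : List Int) (cur count : Int) (answer : List Int) (hc : 2 ≤ cur) :
    pvGroupGo (ds.map pvShift) (cur - 1) count answer = pvGroupGo ds cur count answer := by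
  induction ds generalizing cur count answer with
  | nil => simp [pvGroupGo]
  | cons d rest ih =>
    simp only [List.map_cons, pvGroupGo]
    by_cases h : cur < d
    · rw [if_pos (by unfold pvShift; omega), if_pos h]
      rw [show pvShift d = d - 1 from by unfold pvShift; omega]
      exact ih d 1 _ (by omega)
    · rw [if_neg (by unfold pvShift; omega), if_neg h]
      exact ih cur (count + 1) _ hc

lemma pvGroupGo_pop (ds : List Int) (count : Int) (h1 : ∀ d ∈ ds, 1 ≤ d) :
    pvGroupGo ds 1 count [] =
      (count + ((ds.takeWhile (· == 1)).length : Int)) ::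
        (match ds.dropWhile (· == 1) with
         | [] => []
         | e :: rest => pvGroupGo (e :: rest) e 0 []) := by
  induction ds generalizing count with
  | nil => simp [pvGroupGo]
  | cons d rest ih =>
    have hd1 : 1 ≤ d := h1 d (by simp)
    by_cases h : (1 : Int) < d
    · have hne : ¬ (d == 1) = true := by simp; omega
      simp only [pvGroupGo, List.takeWhile_cons, List.dropWhile_cons, hne, if_pos h]
      rw [pvGroupGo_acc]
      simp
    · have hde : d = 1 := by omega
      have heq : (d == 1) = true := by simp [hde]
      simp only [pvGroupGo, List.takeWhile_cons, List.dropWhile_cons, heq, if_neg (by omega : ¬ 1 < d)]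
      rw [ih (count + 1) (fun x hx => h1 x (by simp [hx]))]
      simp [pvGroupGo, add_assoc]
      omega

lemma pvDropTakeWhile (l : List Int) (q : Int → Bool) :
    l.drop (l.takeWhile q).length = l.dropWhile q := by
  induction l with
  | nil => simp
  | cons a t ih => by_cases h : q a <;> simp [h, ih]

lemma pvZipExt (Z : List (Int × Int)) (PE E : List Int) (hpe : PE = [] ∨ E = []) :
    (Z.map Prod.fst ++ PE).zip (Z.map Prod.snd ++ E) = Z := by
  induction Z with
  | nil => rcases hpe with h | h <;> simp [h]
  | cons x Z' ih => simp [ih]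

lemma pvOuterA_main (fuel : Nat) (Z : List (Int × Int)) (PE E answer : List Int)
    (hpe : PE = [] ∨ E = [])
    (hne : Z ≠ []) (hs : ∀ x ∈ Z, 1 ≤ x.2) (hf : ∀ x ∈ Z, pvDd x ≤ (fuel : Int)) :
    pvOuterA fuel (Z.map Prod.fst ++ PE) (Z.map Prod.snd ++ E) answer =
      answer ++ pvGroupGo (Z.map pvDd) ((Z.map pvDd).headD 0) 0 [] := by
  induction fuel generalizing Z PE E answer with
  | zero =>
    rcases Z with _ | ⟨x, Z'⟩
    · exact absurd rfl hne
    · have h1 := hf x (by simp)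
      have h2 := pvDay_one_le x.1 x.2
      simp only [pvDd] at h1
      simp at h1
      omega
  | succ n ih =>
    rcases Z with _ | ⟨⟨p, s⟩, Z'⟩
    · exact absurd rfl hne
    have hs1 : 1 ≤ s := hs (p, s) (by simp)
    have hzip : ((((p, s) :: Z').map Prod.fst ++ PE).zip (((p, s) :: Z').map Prod.snd ++ E)) = (p, s) :: Z' :=
      pvZipExt _ _ _ hpe
    simp only [pvOuterA, hzip]
    have hfs : (fun xy : Int × Int => xy.1 + xy.2) = pvFs := rfl
    rw [hfs]
    simp only [List.map_cons, PySem.List.pyGet?_zero_cons]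
    rw [show (s :: List.map Prod.snd Z') = ((p, s) :: Z').map Prod.snd from rfl,
        show (pvDd (p, s) :: List.map pvDd Z') = ((p, s) :: Z').map pvDd from rfl,
        show (pvFs (p, s) :: List.map pvFs Z') = ((p, s) :: Z').map pvFs from rfl]
    have hd0 : 1 ≤ pvDay p s := pvDay_one_le p s
    have hd0f : pvDay p s ≤ (n : Int) + 1 := by
      have := hf (p, s) (by simp); simpa [pvDd] using this
    by_cases hpop : 100 ≤ pvFs (p, s)
    · -- the head completed: the inner loop pops the finished prefix
      rw [if_pos hpop]
      have hd01 : pvDay p s = 1 := (pvDay_eq_one_iff p s hs1).2 (by simpa [pvFs] using hpop)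
      rw [pvInnerA_spec ((p, s) :: Z') [] (((p, s) :: Z').map Prod.snd ++ E) hs]
      set ds := ((p, s) :: Z').map pvDd with hds
      set k := (ds.takeWhile (· == 1)).length with hk
      have hk_le : k ≤ Z'.length + 1 := by
        have := (List.takeWhile_sublist (l := ds) (· == 1)).length_le
        simpa [hds] using this
      have hlen_li : ([] ++ (((p, s) :: Z').map pvFs).take k).length = k := by
        simp [List.length_take]
        omega
      have hall1 : ∀ d ∈ ds, 1 ≤ d := by
        intro d hd
        simp only [hds, List.mem_map] at hd
        obtain ⟨x, _, rfl⟩ := hd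
        exact pvDay_one_le x.1 x.2
      have hdw : ds.drop k = ds.dropWhile (· == 1) := pvDropTakeWhile ds (· == 1)
      have hhead : ds.headD 0 = 1 := by simp [hds, pvDd, hd01]
      by_cases hempty : ((((p, s) :: Z').drop k).map pvFs).length = 0
      · rw [if_pos hempty]
        have hkZ : Z'.length + 1 ≤ k := by
          simp [List.length_drop] at hempty; omega
        have hdrop : ds.dropWhile (· == 1) = [] := by
          rw [← hdw]
          exact List.drop_eq_nil_of_le (by simp [hds]; omega)
        rw [hhead, pvGroupGo_pop ds 0 hall1, hdrop, hlen_li]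
        simp [← hk]
      · rw [if_neg hempty]
        have hkZ : k < Z'.length + 1 := by
          by_contra hcon
          exact hempty (by simp [List.length_drop]; omega)
        -- the remainder after the pop, as a new state
        obtain ⟨e, rest, hdr⟩ : ∃ e rest, ds.dropWhile (· == 1) = e :: rest := by
          have : (ds.dropWhile (· == 1)).length ≠ 0 := by
            rw [← hdw]; simp [hds]; omega
          rcases hdd : ds.dropWhile (· == 1) with _ | ⟨e, rest⟩
          · rw [hdd] at this; simp at this
          · exact ⟨e, rest, rfl⟩
        have he_false : (e == 1) = false := by
          have := List.head?_dropWhile_not (· == 1) ds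
          rw [hdr] at this; simpa using this
        have he1 : 1 ≤ e := by
          apply hall1
          have : e ∈ ds.dropWhile (· == 1) := by rw [hdr]; simp
          exact (List.dropWhile_sublist _).subset this
        have he2 : 2 ≤ e := by
          simp at he_false; omega
        have heN : e ≤ (n : Int) + 1 := by
          have hmem : e ∈ ds := (List.dropWhile_sublist _).subset (by rw [hdr]; simp)
          simp only [hds, List.mem_map] at hmem
          obtain ⟨x, hx, rfl⟩ := hmem
          simpa [pvDd] using hf x hx
        have hn1 : 1 ≤ n := by omega
        -- apply the induction hypothesis to the popped state
        set Z2 := (((p, s) :: Z').drop k).map (fun x => (pvFs x, x.2)) with hZ2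
        have e1 : (((p, s) :: Z').drop k).map pvFs = Z2.map Prod.fst := by
          simp only [hZ2, List.map_map]; rfl
        have e2 : (((p, s) :: Z').drop k).map Prod.snd = Z2.map Prod.snd := by
          simp only [hZ2, List.map_map]; rfl
        have eS : ((((p, s) :: Z').map Prod.snd ++ E)).drop k = Z2.map Prod.snd ++ E := by
          rw [List.drop_append_of_le_length (by simp; omega), ← List.map_drop, e2]
        have hih := ih Z2 [] E (answer ++ [(k : Int)]) (Or.inl rfl) ?hne2 ?hs2 ?hf2
        rw [List.append_nil] at hih
        rw [hlen_li, e1, eS, hih]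
        case hne2 =>
          simp [hZ2]
          omega
        case hs2 =>
          intro x hx
          simp only [hZ2, List.mem_map] at hx
          obtain ⟨y, hy, rfl⟩ := hx
          exact hs y (List.drop_subset _ _ hy)
        case hf2 =>
          intro x hx
          simp only [hZ2, List.mem_map] at hx
          obtain ⟨y, hy, rfl⟩ := hx
          have hsy : 1 ≤ y.2 := hs y (List.drop_subset _ _ hy)
          have hfy : pvDd y ≤ (n : Int) + 1 := by
            have := hf y (List.drop_subset _ _ hy); simpa using this
          have := pvDay_shift y.1 y.2 hsy
          simp only [pvDd, pvFs]
          rw [this]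
          simp only [pvShift]
          have := pvDay_one_le y.1 y.2
          simp only [pvDd] at hfy
          omega
        -- identify the days of the new state with the shifted dropped days
        have e3 : Z2.map pvDd = (((((p, s) :: Z').drop k).map pvDd)).map pvShift := by
          simp only [hZ2, List.map_map]
          apply List.map_congr_left
          intro y hy
          have hsy : 1 ≤ y.2 := hs y (List.drop_subset _ _ hy)
          simp only [Function.comp, pvDd]
          exact pvDay_shift y.1 y.2 hsy
        have e4 : (((p, s) :: Z').drop k).map pvDd = e :: rest := by
          rw [← hdr, ← hdw, hds, List.map_drop]
        rw [e3, e4]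
        have e5 : ((e :: rest).map pvShift).headD 0 = e - 1 := by
          simp [pvShift]
          omega
        rw [e5, pvGroupGo_shift (e :: rest) e 0 [] he2]
        rw [hhead, pvGroupGo_pop ds 0 hall1, hdr]
        simp [← hk]
    · -- nobody completed this day: just one increment
      rw [if_neg hpop]
      have hd02 : 2 ≤ pvDay p s := by
        have := pvDay_eq_one_iff p s hs1
        simp only [pvFs] at hpop
        omega
      have hn1 : 1 ≤ n := by omega
      rw [if_neg (by simp)]
      set Z2 := ((p, s) :: Z').map (fun x => (pvFs x, x.2)) with hZ2
      have e1 : ((p, s) :: Z').map pvFs = Z2.map Prod.fst := by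
        simp only [hZ2, List.map_map]; rfl
      have e2 : ((p, s) :: Z').map Prod.snd = Z2.map Prod.snd := by
        simp only [hZ2, List.map_map]
        rfl
      have hih := ih Z2 [] E answer (Or.inl rfl) ?hne2' ?hs2' ?hf2'
      rw [List.append_nil] at hih
      rw [e1, show List.map Prod.snd ((p, s) :: Z') = Z2.map Prod.snd from e2, hih]
      case hne2' => simp [hZ2]
      case hs2' =>
        intro x hx
        simp only [hZ2, List.mem_map] at hx
        obtain ⟨y, hy, rfl⟩ := hx
        exact hs y hy
      case hf2' =>
        intro x hx
        simp only [hZ2, List.mem_map] at hx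
        obtain ⟨y, hy, rfl⟩ := hx
        have hsy : 1 ≤ y.2 := hs y hy
        have hfy : pvDd y ≤ (n : Int) + 1 := by
          have := hf y hy; simpa using this
        rw [show pvDd (pvFs y, y.2) = pvDay (y.1 + y.2) y.2 from rfl, pvDay_shift y.1 y.2 hsy]
        simp only [pvShift]
        have := pvDay_one_le y.1 y.2
        simp only [pvDd] at hfy
        omega
      have e3 : Z2.map pvDd = (((p, s) :: Z').map pvDd).map pvShift := by
        simp only [hZ2, List.map_map]
        apply List.map_congr_left
        intro y hy
        have hsy : 1 ≤ y.2 := hs y hy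
        simp only [Function.comp, pvDd]
        exact pvDay_shift y.1 y.2 hsy
      rw [e3]
      have e5 : ((((p, s) :: Z').map pvDd).map pvShift).headD 0 = pvDay p s - 1 := by
        simp [pvShift, pvDd]
        omega
      rw [e5, pvGroupGo_shift _ (pvDay p s) 0 [] hd02]
      simp [pvDd]


theorem pvZipFst (P S : List Int) : (P.zip S).map Prod.fst = P.take S.length := by
  induction P generalizing S with
  | nil => simp
  | cons a P' ih => rcases S with _ | ⟨b, S'⟩ <;> simp [ih]

theorem pvZipSnd (P S : List Int) : (P.zip S).map Prod.snd = S.take P.length := by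
  induction P generalizing S with
  | nil => simp
  | cons a P' ih => rcases S with _ | ⟨b, S'⟩ <;> simp [ih]

theorem solution_eq (progresses speed : List Int)
    (hne : progresses.zip speed ≠ []) (hs : ∀ x ∈ progresses.zip speed, 1 ≤ x.2) :
    solution progresses speed = solution_alt progresses speed := by
  set Z := progresses.zip speed with hZ
  have hP : progresses = Z.map Prod.fst ++ progresses.drop speed.length := by
    rw [hZ, pvZipFst]; exact (List.take_append_drop _ _).symm
  have hS : speed = Z.map Prod.snd ++ speed.drop progresses.length := by
    rw [hZ, pvZipSnd]; exact (List.take_append_drop _ _).symm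
  have hpe : progresses.drop speed.length = [] ∨ speed.drop progresses.length = [] := by
    rcases le_total progresses.length speed.length with h | h
    · exact Or.inl (List.drop_eq_nil_of_le h)
    · exact Or.inr (List.drop_eq_nil_of_le h)
  have hf : ∀ x ∈ Z, pvDd x ≤ ((101 + (progresses.map Int.natAbs).sum : Nat) : Int) := by
    intro x hx
    have h1 : pvDay x.1 x.2 ≤ 100 + (x.1.natAbs : Int) := pvDay_le_abs x.1 x.2 (hs x hx)
    have h2 : x.1.natAbs ≤ (progresses.map Int.natAbs).sum :=
      List.single_le_sum (fun _ _ => Nat.zero_le _) _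
        (List.mem_map_of_mem (List.of_mem_zip hx).1)
    simp only [pvDd]
    have h2' : ((x.1.natAbs : Nat) : Int) ≤ (((progresses.map Int.natAbs).sum : Nat) : Int) := by
      exact_mod_cast h2
    omega
  have hmain := pvOuterA_main (101 + (progresses.map Int.natAbs).sum) Z
      (progresses.drop speed.length) (speed.drop progresses.length) [] hpe hne hs hf
  rw [← hP, ← hS] at hmain
  rcases hZc : Z with _ | ⟨z0, Zr⟩
  · exact absurd hZc hne
  · have halt : solution_alt progresses speed = pvGroupGo (Z.map pvDd) ((Z.map pvDd).headD 0) 0 [] := by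
      unfold solution_alt
      rw [← hZ, hZc]
      simp only [List.map_cons, List.headD_cons]
      rfl
    unfold solution
    rw [hmain, halt]
    simp

-- ===== VERDICT (by name: the statement is the Claim_ definition above) =====
theorem solution_spec : Claim_equal_solution := by
  intro progresses speed _ hpre
  obtain ⟨hne, hs⟩ := hpre
  unfold Spec_solution
  exact solution_eq progresses speed hne hs
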